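-- pv_equiv track=rewrite | github.com/devjunmo/codetree-TILs | 240103/1차원 젠가/jenga-1d.py | del_block
-- ===== SOURCE A (Python) =====
-- def del_block(arr, s, e):
--     res_lst = []
--
--     # arr를 앞에서 부터 순회하는데 현재 인덱스가 s<= i <= e라면 continue
--     for i in range(len(arr)):
--         idx = i+1
--         if s <= idx <= e:
--             continue
--         res_lst.append(arr[i])
--
--     return res_lst
-- ===== SOURCE B (Python) =====
-- def del_block(arr, s, e):
--     lo = max(s, 1)
--     hi = min(e, len(arr))
--     if lo > hi:
--         return arr[:]
--     return arr[:lo - 1] + arr[hi:]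
-- ===== Notes on version B (the rewrite author's own statement) =====
-- stated objective: simpler
-- what changed: Replaced the per-element index-test loop with a closed-form slice-and-concatenate: clamp [s,e] to [1,len(arr)] and return prefix-before-s plus suffix-after-e (a copy when the clamped range is empty); bulk slicing avoids per-element Python bytecode.
import Mathlib
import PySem

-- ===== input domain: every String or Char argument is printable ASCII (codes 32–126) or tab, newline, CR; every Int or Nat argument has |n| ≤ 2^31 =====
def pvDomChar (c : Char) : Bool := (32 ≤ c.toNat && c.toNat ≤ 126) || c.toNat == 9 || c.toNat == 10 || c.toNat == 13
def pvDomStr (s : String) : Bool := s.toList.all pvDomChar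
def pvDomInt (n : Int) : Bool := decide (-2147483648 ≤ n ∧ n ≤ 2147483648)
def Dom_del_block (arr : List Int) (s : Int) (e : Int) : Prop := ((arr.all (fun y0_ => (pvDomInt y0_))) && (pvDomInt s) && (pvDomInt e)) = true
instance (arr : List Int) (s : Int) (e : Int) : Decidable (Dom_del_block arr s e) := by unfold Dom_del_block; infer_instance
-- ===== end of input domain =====

-- B replaces A's per-element index-test loop by a closed-form clamped slice-and-concatenate (objective: simpler).


-- ===== PORT A =====
-- the for-loop of A: walk the list with the running 1-based index idx = i+1,
-- skip the element when s ≤ idx ≤ e, otherwise append it to the result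
def del_block_go (s e : Int) : List Int → Int → List Int
  | [], _ => []
  | x :: xs, idx =>
    if s ≤ idx ∧ idx ≤ e then del_block_go s e xs (idx + 1)
    else x :: del_block_go s e xs (idx + 1)

def del_block (arr : List Int) (s : Int) (e : Int) : List Int :=
  del_block_go s e arr 1

-- ===== PORT B =====
def del_block_alt (arr : List Int) (s : Int) (e : Int) : List Int :=
  let lo := max s 1
  let hi := min e (arr.length : Int)
  if hi < lo then arr
  else arr.take (lo - 1).toNat ++ arr.drop hi.toNat

-- ===== PRECONDITION & SPEC =====
def Spec_del_block (arr : List Int) (s : Int) (e : Int) (out : List Int) : Prop := out = del_block_alt arr s e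
instance (arr : List Int) (s : Int) (e : Int) (out : List Int) : Decidable (Spec_del_block arr s e out) := by unfold Spec_del_block; infer_instance

-- ===== CLAIM (what is proved, stated in full; the proofs are below) =====
def Claim_equal_del_block : Prop := ∀ (arr : List Int) (s : Int) (e : Int), Dom_del_block arr s e → Spec_del_block arr s e (del_block arr s e)

-- ===== LEMMAS AND PROOFS =====

-- shifting the running index by one is the same as shifting the bounds down by one
theorem del_block_go_shift (s e : Int) (xs : List Int) (i : Int) :
    del_block_go s e xs (i + 1) = del_block_go (s - 1) (e - 1) xs i := by
  induction xs generalizing i with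
  | nil => simp [del_block_go]
  | cons x xs ih =>
    simp only [del_block_go, ih]
    have h : (s ≤ i + 1 ∧ i + 1 ≤ e) ↔ (s - 1 ≤ i ∧ i ≤ e - 1) := by omega
    rw [if_congr h rfl rfl]

theorem del_block_go_eq_alt (xs : List Int) (s e : Int) :
    del_block_go s e xs 1 = del_block_alt xs s e := by
  induction xs generalizing s e with
  | nil => simp [del_block_go, del_block_alt]
  | cons x xs ih =>
    have key := del_block_go_shift s e xs 1
    simp only [del_block_go, key, ih]
    simp only [del_block_alt, List.length_cons]
    push_cast
    by_cases hs : s ≤ 1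
    · by_cases he : 1 ≤ e
      · -- head is deleted
        rw [if_pos ⟨hs, he⟩]
        have hlo : max s 1 = 1 := by omega
        have hlo' : max (s - 1) 1 = 1 := by omega
        rw [hlo, hlo']
        have hhi : ¬ (min e ((xs.length : Int) + 1) < 1) := by omega
        rw [if_neg hhi]
        by_cases h2 : min (e - 1) (xs.length : Int) < 1
        · -- clamped range ends at the head: B's copy branch on the tail
          rw [if_pos h2]
          have : (min e ((xs.length : Int) + 1)).toNat = 1 := by omega
          simp [this]
        · rw [if_neg h2]
          have h1 : (min e ((xs.length : Int) + 1)).toNat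
              = (min (e - 1) (xs.length : Int)).toNat + 1 := by omega
          simp [h1]
      · -- e < 1 : nothing deleted anywhere
        rw [if_neg (by omega : ¬ (s ≤ 1 ∧ 1 ≤ e))]
        have h1 : min e ((xs.length : Int) + 1) < max s 1 := by omega
        have h2 : min (e - 1) (xs.length : Int) < max (s - 1) 1 := by omega
        rw [if_pos h1, if_pos h2]
    · -- s ≥ 2 : head is kept
      rw [if_neg (by omega : ¬ (s ≤ 1 ∧ 1 ≤ e))]
      have hlo : max s 1 = s := by omega
      have hlo' : max (s - 1) 1 = s - 1 := by omega
      rw [hlo, hlo']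
      by_cases h1 : min e ((xs.length : Int) + 1) < s
      · rw [if_pos h1, if_pos (by omega : min (e - 1) (xs.length : Int) < s - 1)]
      · rw [if_neg h1, if_neg (by omega : ¬ min (e - 1) (xs.length : Int) < s - 1)]
        have hts : (s - 1).toNat = (s - 1 - 1).toNat + 1 := by omega
        have hth : (min e ((xs.length : Int) + 1)).toNat
            = (min (e - 1) (xs.length : Int)).toNat + 1 := by omega
        rw [hts, hth]
        simp

-- ===== VERDICT (by name: the statement is the Claim_ definition above) =====
theorem del_block_spec : Claim_equal_del_block := by
  intro arr s e _
  unfold Spec_del_block del_block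
  exact del_block_go_eq_alt arr s e
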